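-- pv_equiv track=rewrite | github.com/cja14/CASTEP_VCA_scripts | strindices.py | eitheror_strsindex
-- ===== SOURCE A (Python) =====
-- def eitheror_strsindex(list,strings,nmin=0,nmax=0):
--     if nmax == 0:
--         nmax = len(list)
--     i = 0
--     for item in list:
--         if any(string in item for string in strings):
--             if i >= nmin and i <= nmax:
--                 index = i
--         i = i+1
--     return index
-- ===== SOURCE B (Python) =====
-- def eitheror_strsindex(list, strings, nmin=0, nmax=0):
--     if nmax == 0:
--         nmax = len(list)
--     for i in range(len(list) - 1, -1, -1):
--         if nmin <= i <= nmax and any(s in list[i] for s in strings):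
--             index = i
--             break
--     return index
-- ===== Notes on version B (the rewrite author's own statement) =====
-- stated objective: faster
-- what changed: B replaces A's full forward scan that keeps overwriting the last qualifying index with a backward scan from the end that returns at the first qualifying index, so it stops as soon as the answer is found.
import Mathlib
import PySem

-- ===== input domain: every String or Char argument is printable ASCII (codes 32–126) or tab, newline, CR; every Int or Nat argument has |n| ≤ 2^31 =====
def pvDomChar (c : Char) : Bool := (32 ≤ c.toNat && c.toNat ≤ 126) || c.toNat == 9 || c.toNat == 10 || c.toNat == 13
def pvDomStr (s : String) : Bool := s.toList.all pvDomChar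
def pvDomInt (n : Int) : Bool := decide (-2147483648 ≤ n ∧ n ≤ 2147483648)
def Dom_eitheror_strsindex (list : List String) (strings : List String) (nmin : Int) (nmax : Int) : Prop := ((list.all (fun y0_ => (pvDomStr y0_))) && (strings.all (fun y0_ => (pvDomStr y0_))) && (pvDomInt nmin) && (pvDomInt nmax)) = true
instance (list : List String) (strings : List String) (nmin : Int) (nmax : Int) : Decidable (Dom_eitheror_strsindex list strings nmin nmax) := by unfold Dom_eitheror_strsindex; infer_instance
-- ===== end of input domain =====

-- B replaces A's full forward scan (which keeps overwriting the last qualifying index)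
-- with a backward scan from the end that returns at the first qualifying index (early exit).

-- shared helper: the 'if nmax == 0: nmax = len(list)' guard, identical in both Pythons
def pvNmax (list : List String) (nmax : Int) : Int := if nmax = 0 then (list.length : Int) else nmax
-- shared helper: 'any(string in item for string in strings)'
def pvHit (strings : List String) (item : String) : Bool := strings.any (fun s => PySem.Str.isIn s item)

-- ===== PORT A =====
-- forward loop with an explicit counter; the Option accumulator is Python's conditionally-assigned
-- local 'index' (none = UnboundLocalError on return; excluded by Pre_)
def eitheror_strsindex (list : List String) (strings : List String) (nmin : Int) (nmax : Int) : Int :=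
  let nmax' := pvNmax list nmax
  ((list.foldl
      (fun (st : Int × Option Int) item =>
        (st.1 + 1,
         if pvHit strings item then
           if nmin ≤ st.1 ∧ st.1 ≤ nmax' then some st.1 else st.2
         else st.2))
      ((0 : Int), (none : Option Int))).2).getD 0

-- ===== PORT B =====
-- 'for i in range(len(list)-1, -1, -1): if nmin <= i <= nmax and any(...): index = i; break'
-- pvDownScan n scans indices n-1, n-2, …, 0 and returns the first hit (none = UnboundLocalError; excluded by Pre_)
def pvDownScan (c : Nat → Bool) : Nat → Option Nat
  | 0 => none
  | n+1 => if c n then some n else pvDownScan c n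

def eitheror_strsindex_alt (list : List String) (strings : List String) (nmin : Int) (nmax : Int) : Int :=
  let nmax' := pvNmax list nmax
  (((pvDownScan
       (fun i => (decide (nmin ≤ (i : Int)) && decide ((i : Int) ≤ nmax')) && pvHit strings (list.getD i ""))
       list.length).map (fun i => (i : Int))).getD 0)

-- ===== PRECONDITION & SPEC =====
-- Pre_ excludes exactly the inputs with no qualifying index, where both Pythons raise UnboundLocalError.
def Pre_eitheror_strsindex (list : List String) (strings : List String) (nmin : Int) (nmax : Int) : Prop :=
  ((List.range list.length).any
    (fun k => (decide (nmin ≤ (k : Int)) && decide ((k : Int) ≤ pvNmax list nmax)) && pvHit strings (list.getD k ""))) = true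
instance (list : List String) (strings : List String) (nmin : Int) (nmax : Int) : Decidable (Pre_eitheror_strsindex list strings nmin nmax) := by unfold Pre_eitheror_strsindex; infer_instance

def pvWitness_eitheror_strsindex : List String × List String × Int × Int := (["ab", "cd"], ["c"], 0, 0)

def Spec_eitheror_strsindex (list : List String) (strings : List String) (nmin : Int) (nmax : Int) (out : Int) : Prop := out = eitheror_strsindex_alt list strings nmin nmax
instance (list : List String) (strings : List String) (nmin : Int) (nmax : Int) (out : Int) : Decidable (Spec_eitheror_strsindex list strings nmin nmax out) := by unfold Spec_eitheror_strsindex; infer_instance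

-- ===== CLAIM (what is proved, stated in full; the proofs are below) =====
def Claim_equal_eitheror_strsindex : Prop := ∀ (list : List String) (strings : List String) (nmin : Int) (nmax : Int), Dom_eitheror_strsindex list strings nmin nmax → Pre_eitheror_strsindex list strings nmin nmax → Spec_eitheror_strsindex list strings nmin nmax (eitheror_strsindex list strings nmin nmax)

-- ===== LEMMAS AND PROOFS =====

-- A's loop counter after the fold is the start counter plus the list length
lemma pv_fst_fold (strings : List String) (nmin nmax' : Int) :
    ∀ (l : List String) (i0 : Int) (acc : Option Int),
      (l.foldl
        (fun (st : Int × Option Int) item =>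
          (st.1 + 1,
           if pvHit strings item then
             if nmin ≤ st.1 ∧ st.1 ≤ nmax' then some st.1 else st.2
           else st.2))
        (i0, acc)).1 = i0 + l.length := by
  intro l
  induction l with
  | nil => intro i0 acc; simp
  | cons x xs ih =>
    intro i0 acc
    simp only [List.foldl_cons, List.length_cons]
    rw [ih]
    push_cast; ring

-- the down-scan only looks at indices below its argument
lemma pv_down_congr (c1 c2 : Nat → Bool) :
    ∀ n, (∀ k, k < n → c1 k = c2 k) → pvDownScan c1 n = pvDownScan c2 n := by
  intro n
  induction n with
  | zero => intro _; rfl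
  | succ m ih =>
    intro h
    simp only [pvDownScan, h m (Nat.lt_succ_self m)]
    rw [ih (fun k hk => h k (Nat.lt_succ_of_lt hk))]

-- the last qualifying index of the forward scan is the first hit of the backward scan
lemma pv_main (strings : List String) (nmin nmax' : Int) :
    ∀ (l : List String),
      (l.foldl
        (fun (st : Int × Option Int) item =>
          (st.1 + 1,
           if pvHit strings item then
             if nmin ≤ st.1 ∧ st.1 ≤ nmax' then some st.1 else st.2
           else st.2))
        ((0 : Int), (none : Option Int))).2
      = (pvDownScan
           (fun i => (decide (nmin ≤ (i : Int)) && decide ((i : Int) ≤ nmax')) && pvHit strings (l.getD i ""))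
           l.length).map (fun i => (i : Int)) := by
  intro l
  induction l using List.reverseRecOn with
  | nil => rfl
  | append_singleton ys x ih =>
    rw [List.foldl_append]
    have hfst := pv_fst_fold strings nmin nmax' ys 0 none
    simp only [List.foldl_cons, List.foldl_nil]
    rw [hfst, zero_add]
    simp only [List.length_append, List.length_cons, List.length_nil]
    rw [show ys.length + 1 = Nat.succ ys.length from rfl]
    simp only [pvDownScan]
    have hgetlast : (ys ++ [x]).getD ys.length "" = x := by
      simp [List.getD]
    have hcongr : pvDownScan
        (fun i => (decide (nmin ≤ (i : Int)) && decide ((i : Int) ≤ nmax')) && pvHit strings ((ys ++ [x]).getD i ""))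
        ys.length
      = pvDownScan
        (fun i => (decide (nmin ≤ (i : Int)) && decide ((i : Int) ≤ nmax')) && pvHit strings (ys.getD i ""))
        ys.length := by
      apply pv_down_congr
      intro k hk
      congr 2
      simp [List.getD, List.getElem?_append_left hk]
    simp only [hgetlast, hcongr]
    by_cases hh : pvHit strings x = true
    · by_cases hb : nmin ≤ (ys.length : Int) ∧ (ys.length : Int) ≤ nmax'
      · simp [hh, hb]
      · have hc : ((decide (nmin ≤ (ys.length : Int)) && decide ((ys.length : Int) ≤ nmax')) && pvHit strings x) = false := by
          simp only [Bool.and_eq_false_iff, decide_eq_false_iff_not]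
          tauto
        rw [hc]
        simp only [if_true, if_neg hb, Bool.false_eq_true, if_false, hh]
        exact ih
    · have hh' : pvHit strings x = false := by simpa using hh
      have hc : ((decide (nmin ≤ (ys.length : Int)) && decide ((ys.length : Int) ≤ nmax')) && pvHit strings x) = false := by
        simp [hh']
      rw [hc]
      simp only [hh', Bool.false_eq_true, if_false]
      exact ih

-- ===== VERDICT (by name: the statement is the Claim_ definition above) =====
theorem eitheror_strsindex_spec : Claim_equal_eitheror_strsindex := by
  intro list strings nmin nmax _ _
  unfold Spec_eitheror_strsindex eitheror_strsindex eitheror_strsindex_alt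
  exact congrArg (fun o => o.getD 0) (pv_main strings nmin (pvNmax list nmax) list)
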